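-- pv_equiv track=rewrite | github.com/anaclaragelabert/Entregable1 | trivia/functions.py | ejecutar_ronda
-- ===== SOURCE A (Python) =====
-- from typing import List, Dict, Tuple, Callable, Generator
--
-- def calcular_puntaje(respuestas_correctas: int) -> int:
--     return respuestas_correctas * 10
--
-- MonadaResultado = Tuple[int, str]
--
-- def verificar_respuesta(pregunta: List[str], respuesta_usuario: int, opciones: List[str]) -> MonadaResultado:
--     verificacion_res = lambda answer: answer.lower() == pregunta[2].lower()
--
--     es_correcto = verificacion_res(opciones[respuesta_usuario - 1])
--     log = f"\nCategoría: {pregunta[0]}\nPregunta: {pregunta[1]}\n"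
--
--     if es_correcto:
--         log += "\n¡Correcto!\n"
--         return 1, log
--     else:
--         log += f"\nIncorrecto. La respuesta correcta era: {pregunta[2]}\n"
--         return 0, log
--
-- def bind(func: Callable[[int], MonadaResultado], monada: MonadaResultado) -> MonadaResultado:
--     res = func(monada[0])
--     return res[0], monada[1] + res[1]
--
-- def unit(valor: int) -> MonadaResultado:
--     return valor, ""
--
-- def procesar_pregunta(pregunta: List[str], opciones: List[str], respuesta_usuario: int) -> Callable[[MonadaResultado], MonadaResultado]:
--     return lambda estado: bind(lambda _: verificar_respuesta(pregunta, respuesta_usuario, opciones), estado)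
--
-- def ejecutar_ronda(preguntas: List[List[str]], opciones: List[List[str]], respuestas_usuario: List[int]) -> List[str]:
--     resultado_final = unit(0)
--
--     # Procesar cada pregunta
--     procesos = [procesar_pregunta(pregunta, opciones[i], respuestas_usuario[i]) for i, pregunta in enumerate(preguntas)]
--
--     # Acumulando resultados y logs
--     # En lugar de acumular repetidamente, procesamos cada pregunta una vez
--     for proceso in procesos:
--         resultado_final = proceso(resultado_final)
--
--     # Extraer solo el log final (sin repeticiones)
--     logs = resultado_final[1]  # Resultado final contiene los logs acumulados sin necesidad de lista
--
--     # Calcular puntaje total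
--     puntaje_total = calcular_puntaje(resultado_final[0])
--
--     return [logs] + [f"\nResultado final: {puntaje_total}\n"]
-- ===== SOURCE B (Python) =====
-- def ejecutar_ronda(preguntas, opciones, respuestas_usuario):
--     # Direct loop, no monad/bind/closures: accumulate the log and keep the verdict
--     # of the most recent question; the final score is 10 if the last question was
--     # answered correctly, else 0 (exactly the value A's bind-fold produces).
--     log = ""
--     ultimo = 0
--     for i, pregunta in enumerate(preguntas):
--         es_correcto = opciones[i][respuestas_usuario[i] - 1].lower() == pregunta[2].lower()
--         if es_correcto:
--             ultimo = 1
--             log += f"\nCategoría: {pregunta[0]}\nPregunta: {pregunta[1]}\n\n¡Correcto!\n"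
--         else:
--             ultimo = 0
--             log += f"\nCategoría: {pregunta[0]}\nPregunta: {pregunta[1]}\n\nIncorrecto. La respuesta correcta era: {pregunta[2]}\n"
--     return [log, f"\nResultado final: {ultimo * 10}\n"]
-- ===== Notes on version B (the rewrite author's own statement) =====
-- stated objective: simpler
-- what changed: Replaces the monad/bind/unit/procesar closure machinery (a list of closures folded over a threaded state) by one direct loop with two plain accumulators: the log string and the verdict of the most recent question, whose value times 10 is exactly the score A's bind-fold returns.
import Mathlib
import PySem

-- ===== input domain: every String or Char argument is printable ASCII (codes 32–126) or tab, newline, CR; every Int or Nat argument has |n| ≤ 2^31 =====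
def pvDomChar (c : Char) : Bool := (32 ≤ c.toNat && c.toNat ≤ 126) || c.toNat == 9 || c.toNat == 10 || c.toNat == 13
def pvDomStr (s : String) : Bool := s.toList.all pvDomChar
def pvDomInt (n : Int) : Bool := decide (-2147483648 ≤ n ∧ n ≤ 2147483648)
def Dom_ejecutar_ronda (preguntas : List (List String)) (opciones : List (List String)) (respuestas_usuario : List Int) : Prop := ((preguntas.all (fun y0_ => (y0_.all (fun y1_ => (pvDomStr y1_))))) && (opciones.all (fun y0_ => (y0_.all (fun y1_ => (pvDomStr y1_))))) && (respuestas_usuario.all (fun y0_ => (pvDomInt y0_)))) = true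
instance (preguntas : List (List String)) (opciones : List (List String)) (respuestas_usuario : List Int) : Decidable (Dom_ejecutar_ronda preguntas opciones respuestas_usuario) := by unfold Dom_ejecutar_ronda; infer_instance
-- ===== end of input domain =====

-- B replaces A's monad/bind closure machinery by one direct loop accumulating the log
-- and the last question's verdict; objective: simpler. Proved equal to A on Pre_.


-- ===== PORT A =====
-- (pyGetD defaults are only reached outside Pre_ejecutar_ronda, where Python raises)
def calcular_puntaje (respuestas_correctas : Int) : Int := respuestas_correctas * 10

def verificar_respuesta (pregunta : List String) (respuesta_usuario : Int) (opciones : List String) : Int × String :=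
  let es_correcto := PySem.Str.lower (PySem.List.pyGetD opciones (respuesta_usuario - 1) "")
      == PySem.Str.lower (PySem.List.pyGetD pregunta 2 "")
  let log := "\nCategoría: " ++ PySem.List.pyGetD pregunta 0 "" ++ "\nPregunta: " ++ PySem.List.pyGetD pregunta 1 "" ++ "\n"
  if es_correcto then (1, log ++ "\n¡Correcto!\n")
  else (0, log ++ ("\nIncorrecto. La respuesta correcta era: " ++ PySem.List.pyGetD pregunta 2 "" ++ "\n"))

def bindPy (func : Int → Int × String) (monada : Int × String) : Int × String :=
  let res := func monada.1
  (res.1, monada.2 ++ res.2)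

def unitPy (valor : Int) : Int × String := (valor, "")

def procesar_pregunta (pregunta : List String) (opciones : List String) (respuesta_usuario : Int) : (Int × String) → (Int × String) :=
  fun estado => bindPy (fun _ => verificar_respuesta pregunta respuesta_usuario opciones) estado

def ejecutar_ronda (preguntas : List (List String)) (opciones : List (List String)) (respuestas_usuario : List Int) : List String :=
  let resultado_inicial := unitPy 0
  let procesos := (PySem.List.enumerate preguntas 0).map (fun ip =>
      procesar_pregunta ip.2 (PySem.List.pyGetD opciones ip.1 []) (PySem.List.pyGetD respuestas_usuario ip.1 0))
  let resultado_final := procesos.foldl (fun acc proceso => proceso acc) resultado_inicial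
  let logs := resultado_final.2
  let puntaje_total := calcular_puntaje resultado_final.1
  [logs] ++ ["\nResultado final: " ++ PySem.Int.toStr puntaje_total ++ "\n"]

-- ===== PORT B =====
def ejecutar_ronda_alt (preguntas : List (List String)) (opciones : List (List String)) (respuestas_usuario : List Int) : List String :=
  let r := (PySem.List.enumerate preguntas 0).foldl (fun (acc : String × Int) ip =>
      let pregunta := ip.2
      let es_correcto := PySem.Str.lower (PySem.List.pyGetD (PySem.List.pyGetD opciones ip.1 []) (PySem.List.pyGetD respuestas_usuario ip.1 0 - 1) "")
          == PySem.Str.lower (PySem.List.pyGetD pregunta 2 "")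
      if es_correcto then
        (acc.1 ++ ("\nCategoría: " ++ PySem.List.pyGetD pregunta 0 "" ++ "\nPregunta: " ++ PySem.List.pyGetD pregunta 1 "" ++ "\n\n¡Correcto!\n"), 1)
      else
        (acc.1 ++ ("\nCategoría: " ++ PySem.List.pyGetD pregunta 0 "" ++ "\nPregunta: " ++ PySem.List.pyGetD pregunta 1 "" ++ "\n\nIncorrecto. La respuesta correcta era: " ++ PySem.List.pyGetD pregunta 2 "" ++ "\n"), 0))
    ("", (0 : Int))
  [r.1, "\nResultado final: " ++ PySem.Int.toStr (r.2 * 10) ++ "\n"]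

-- ===== PRECONDITION & SPEC =====
-- Pre_ excludes exactly the inputs where Python A raises an IndexError: a question list
-- shorter than 3, opciones/respuestas_usuario shorter than preguntas, or an answer index
-- outside Python's (negative-wrapping) range of the question's option list.
def Pre_ejecutar_ronda (preguntas : List (List String)) (opciones : List (List String)) (respuestas_usuario : List Int) : Prop :=
  preguntas.length ≤ opciones.length ∧ preguntas.length ≤ respuestas_usuario.length ∧
  ∀ i : Nat, i < preguntas.length →
    3 ≤ (preguntas.getD i []).length ∧
    PySem.Raise.InRange (opciones.getD i []).length (respuestas_usuario.getD i 0 - 1)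
instance (preguntas : List (List String)) (opciones : List (List String)) (respuestas_usuario : List Int) : Decidable (Pre_ejecutar_ronda preguntas opciones respuestas_usuario) := by unfold Pre_ejecutar_ronda; infer_instance

def pvWitness_ejecutar_ronda : List (List String) × List (List String) × List Int :=
  ([["cat", "q1", "A"], ["cat", "q2", "B"]], [["A", "C"], ["B", "C"]], [1, 2])

def Spec_ejecutar_ronda (preguntas : List (List String)) (opciones : List (List String)) (respuestas_usuario : List Int) (out : List String) : Prop := out = ejecutar_ronda_alt preguntas opciones respuestas_usuario
instance (preguntas : List (List String)) (opciones : List (List String)) (respuestas_usuario : List Int) (out : List String) : Decidable (Spec_ejecutar_ronda preguntas opciones respuestas_usuario out) := by unfold Spec_ejecutar_ronda; infer_instance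

-- ===== CLAIM (what is proved, stated in full; the proofs are below) =====
def Claim_equal_ejecutar_ronda : Prop := ∀ (preguntas : List (List String)) (opciones : List (List String)) (respuestas_usuario : List Int), Dom_ejecutar_ronda preguntas opciones respuestas_usuario → Pre_ejecutar_ronda preguntas opciones respuestas_usuario → Spec_ejecutar_ronda preguntas opciones respuestas_usuario (ejecutar_ronda preguntas opciones respuestas_usuario)

-- ===== LEMMAS AND PROOFS =====
-- the fold inside port A, named for the proofs
def pvFoldA (p o : List (List String)) (r : List Int) : Int × String :=
  ((PySem.List.enumerate p 0).map (fun ip =>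
      procesar_pregunta ip.2 (PySem.List.pyGetD o ip.1 []) (PySem.List.pyGetD r ip.1 0))).foldl
    (fun acc proceso => proceso acc) (unitPy 0)

-- the fold inside port B, named for the proofs
def pvStepB (o : List (List String)) (r : List Int) (acc : String × Int) (ip : Int × List String) : String × Int :=
  let pregunta := ip.2
  let es_correcto := PySem.Str.lower (PySem.List.pyGetD (PySem.List.pyGetD o ip.1 []) (PySem.List.pyGetD r ip.1 0 - 1) "")
      == PySem.Str.lower (PySem.List.pyGetD pregunta 2 "")
  if es_correcto then
    (acc.1 ++ ("\nCategoría: " ++ PySem.List.pyGetD pregunta 0 "" ++ "\nPregunta: " ++ PySem.List.pyGetD pregunta 1 "" ++ "\n\n¡Correcto!\n"), 1)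
  else
    (acc.1 ++ ("\nCategoría: " ++ PySem.List.pyGetD pregunta 0 "" ++ "\nPregunta: " ++ PySem.List.pyGetD pregunta 1 "" ++ "\n\nIncorrecto. La respuesta correcta era: " ++ PySem.List.pyGetD pregunta 2 "" ++ "\n"), 0)

def pvFoldB (p o : List (List String)) (r : List Int) : String × Int :=
  (PySem.List.enumerate p 0).foldl (pvStepB o r) ("", (0 : Int))

theorem pv_B_eq (p o : List (List String)) (r : List Int) :
    ejecutar_ronda_alt p o r = [(pvFoldB p o r).1,
      "\nResultado final: " ++ PySem.Int.toStr ((pvFoldB p o r).2 * 10) ++ "\n"] := rfl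

-- one step of A's fold equals one step of B's fold, components swapped
theorem pv_step_eq (o : List (List String)) (r : List Int) (ip : Int × List String) (s : Int × String) :
    procesar_pregunta ip.2 (PySem.List.pyGetD o ip.1 []) (PySem.List.pyGetD r ip.1 0) s
      = ((pvStepB o r (s.2, s.1) ip).2, (pvStepB o r (s.2, s.1) ip).1) := by
  simp only [procesar_pregunta, bindPy, verificar_respuesta, pvStepB]
  split <;> simp [String.append_assoc] <;> rw [← String.append_assoc] <;> rfl

-- the two folds carry the same state up to swapping the pair components
theorem pv_fold_eq (o : List (List String)) (r : List Int) (l : List (Int × List String)) (s : Int × String) :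
    (l.map (fun ip => procesar_pregunta ip.2 (PySem.List.pyGetD o ip.1 []) (PySem.List.pyGetD r ip.1 0))).foldl
      (fun acc proceso => proceso acc) s
    = ((l.foldl (pvStepB o r) (s.2, s.1)).2, (l.foldl (pvStepB o r) (s.2, s.1)).1) := by
  induction l generalizing s with
  | nil => rfl
  | cons ip t ih =>
      simp only [List.map_cons, List.foldl_cons]
      rw [ih, pv_step_eq]

theorem pv_A_eq_B (p o : List (List String)) (r : List Int) :
    ejecutar_ronda p o r = ejecutar_ronda_alt p o r := by
  show [(pvFoldA p o r).2, "\nResultado final: " ++ PySem.Int.toStr (calcular_puntaje (pvFoldA p o r).1) ++ "\n"]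
      = ejecutar_ronda_alt p o r
  rw [pv_B_eq]
  have h := pv_fold_eq o r (PySem.List.enumerate p 0) (unitPy 0)
  simp only [pvFoldA, pvFoldB, unitPy] at h ⊢
  rw [h]
  rfl

-- ===== VERDICT (by name: the statement is the Claim_ definition above) =====
theorem ejecutar_ronda_spec : Claim_equal_ejecutar_ronda := by
  intro p o r _hdom _hpre
  exact pv_A_eq_B p o r
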